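-- pv_equiv track=rewrite | github.com/adiazmont/optical-network-simulator | CIANTestbed.py | check_bins
-- ===== SOURCE A (Python) =====
-- def check_bins(channels):
--     bin1 = []
--     bin2 = []
--     bin3 = []
--     bin4 = []
--     bin5 = []
--     bin6 = []
--     bin7 = []
--     bin8 = []
--     bin9 = []
--     bin10 = []
--     bins = {}
--
--     for channel in channels:
--         if channel <= 9:
--             bin1.append(channel)
--         elif channel <= 18:
--             bin2.append(channel)
--         elif channel <= 27:
--             bin3.append(channel)
--         elif channel <= 36:
--              bin4.append(channel)
--         elif channel <= 45:
--             bin5.append(channel)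
--         elif channel <= 54:
--             bin6.append(channel)
--         elif channel <= 63:
--             bin7.append(channel)
--         elif channel <= 72:
--             bin8.append(channel)
--         elif channel <= 81:
--             bin9.append(channel)
--         elif channel <= 90:
--             bin10.append(channel)
--
--     bins[1] = len(bin1)
--     bins[2] = len(bin2)
--     bins[3] = len(bin3)
--     bins[4] = len(bin4)
--     bins[5] = len(bin5)
--     bins[6] = len(bin6)
--     bins[7] = len(bin7)
--     bins[8] = len(bin8)
--     bins[9] = len(bin9)
--     bins[10] = len(bin10)
--
--     return bins
-- ===== SOURCE B (Python) =====
-- def check_bins(channels):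
--     # Staged passes: ten cumulative counts count(channel <= 9k), then each bin
--     # is the finite difference of consecutive cumulative counts.
--     cum = [sum(1 for c in channels if c <= 9 * k) for k in range(1, 11)]
--     bins = {}
--     prev = 0
--     k = 1
--     for c in cum:
--         bins[k] = c - prev
--         prev = c
--         k += 1
--     return bins
-- ===== Notes on version B (the rewrite author's own statement) =====
-- stated objective: alternative
-- what changed: A bins in a single pass through a ten-branch if/elif cascade into ten lists and reads off their lengths; B instead makes staged passes computing the ten cumulative counts count(channel <= 9k) and recovers each bin as the finite difference of consecutive cumulative counts.
import Mathlib
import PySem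

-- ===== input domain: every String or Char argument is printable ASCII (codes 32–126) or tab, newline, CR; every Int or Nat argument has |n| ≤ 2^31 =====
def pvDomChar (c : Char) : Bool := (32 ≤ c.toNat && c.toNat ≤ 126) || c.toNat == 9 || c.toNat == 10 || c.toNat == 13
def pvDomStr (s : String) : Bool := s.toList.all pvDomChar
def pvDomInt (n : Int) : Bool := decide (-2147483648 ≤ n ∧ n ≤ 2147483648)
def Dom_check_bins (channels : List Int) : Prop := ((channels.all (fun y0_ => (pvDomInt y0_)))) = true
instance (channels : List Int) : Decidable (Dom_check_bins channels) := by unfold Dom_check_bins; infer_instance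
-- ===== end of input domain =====

-- B replaces A's single-pass ten-branch cascade into ten lists by staged passes computing the
-- cumulative counts count(channel <= 9k) and taking finite differences (objective: alternative).

-- ===== PORT A =====
-- the ten bin lists carried as one tuple of state, exactly A's loop
abbrev pvStateA := List Int × List Int × List Int × List Int × List Int ×
                List Int × List Int × List Int × List Int × List Int

def pvStepA (st : pvStateA) (channel : Int) : pvStateA :=
  match st with
  | (b1, b2, b3, b4, b5, b6, b7, b8, b9, b10) =>
    if channel ≤ 9 then (b1 ++ [channel], b2, b3, b4, b5, b6, b7, b8, b9, b10)
    else if channel ≤ 18 then (b1, b2 ++ [channel], b3, b4, b5, b6, b7, b8, b9, b10)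
    else if channel ≤ 27 then (b1, b2, b3 ++ [channel], b4, b5, b6, b7, b8, b9, b10)
    else if channel ≤ 36 then (b1, b2, b3, b4 ++ [channel], b5, b6, b7, b8, b9, b10)
    else if channel ≤ 45 then (b1, b2, b3, b4, b5 ++ [channel], b6, b7, b8, b9, b10)
    else if channel ≤ 54 then (b1, b2, b3, b4, b5, b6 ++ [channel], b7, b8, b9, b10)
    else if channel ≤ 63 then (b1, b2, b3, b4, b5, b6, b7 ++ [channel], b8, b9, b10)
    else if channel ≤ 72 then (b1, b2, b3, b4, b5, b6, b7, b8 ++ [channel], b9, b10)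
    else if channel ≤ 81 then (b1, b2, b3, b4, b5, b6, b7, b8, b9 ++ [channel], b10)
    else if channel ≤ 90 then (b1, b2, b3, b4, b5, b6, b7, b8, b9, b10 ++ [channel])
    else (b1, b2, b3, b4, b5, b6, b7, b8, b9, b10)

def check_bins (channels : List Int) : List (Int × Int) :=
  match channels.foldl pvStepA ([], [], [], [], [], [], [], [], [], []) with
  | (b1, b2, b3, b4, b5, b6, b7, b8, b9, b10) =>
    (((((((((((PySem.Dict.empty :
        PySem.Dict Int Int).insert 1 (b1.length : Int)).insert 2 (b2.length : Int)).insert 3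
        (b3.length : Int)).insert 4 (b4.length : Int)).insert 5 (b5.length : Int)).insert 6
        (b6.length : Int)).insert 7 (b7.length : Int)).insert 8 (b8.length : Int)).insert 9
        (b9.length : Int)).insert 10 (b10.length : Int)).items

-- ===== PORT B =====
-- sum(1 for c in channels if c <= b)
def pvCountLe (channels : List Int) (b : Int) : Int :=
  channels.foldl (fun acc c => if c ≤ b then acc + 1 else acc) 0

def check_bins_alt (channels : List Int) : List (Int × Int) :=
  let cum := (PySem.List.pyRange 1 11 1).map (fun k => pvCountLe channels (9 * k))
  -- the loop 'for c in cum: bins[k] = c - prev; prev = c; k += 1' carried as (bins, k, prev)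
  let fin := cum.foldl (fun (st : PySem.Dict Int Int × Int × Int) c =>
      (st.1.insert st.2.1 (c - st.2.2), st.2.1 + 1, c)) (PySem.Dict.empty, 1, 0)
  fin.1.items

-- ===== PRECONDITION & SPEC =====
def Spec_check_bins (channels : List Int) (out : List (Int × Int)) : Prop := out = check_bins_alt channels
instance (channels : List Int) (out : List (Int × Int)) : Decidable (Spec_check_bins channels out) := by unfold Spec_check_bins; infer_instance

-- ===== CLAIM (what is proved, stated in full; the proofs are below) =====
def Claim_equal_check_bins : Prop := ∀ (channels : List Int), Dom_check_bins channels → Spec_check_bins channels (check_bins channels)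

-- ===== LEMMAS AND PROOFS =====

-- B's cumulative pass counts exactly the elements ≤ b
lemma pvCountLe_eq_countP (channels : List Int) (b : Int) :
    pvCountLe channels b = (channels.countP (fun c => decide (c ≤ b)) : Int) := by
  unfold pvCountLe
  simp only [PySem.List.foldl_ite_eq_foldl_filter, PySem.List.foldl_add, List.map_const',
    List.sum_replicate, Int.nsmul_eq_mul, mul_one, zero_add, Nat.cast_inj]
  exact List.countP_eq_length_filter.symm

-- a half-open interval count is the difference of two cumulative counts
lemma pvCountP_interval (lo hi : Int) (hlh : lo ≤ hi) (xs : List Int) :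
    (xs.countP (fun c => decide (¬(c ≤ lo) ∧ c ≤ hi)) : Int)
      = (xs.countP (fun c => decide (c ≤ hi)) : Int) - (xs.countP (fun c => decide (c ≤ lo)) : Int) := by
  induction xs with
  | nil => simp
  | cons x xs ih =>
    simp only [List.countP_cons, decide_eq_true_eq]
    push_cast
    first | (split_ifs <;> omega) | omega

-- the lengths of A's ten bin lists after the fold, as interval counts over the input
set_option maxHeartbeats 1000000 in
lemma pvFoldA_lens (channels : List Int) :
    ∀ (s1 s2 s3 s4 s5 s6 s7 s8 s9 s10 r1 r2 r3 r4 r5 r6 r7 r8 r9 r10 : List Int),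
    channels.foldl pvStepA (s1, s2, s3, s4, s5, s6, s7, s8, s9, s10)
      = (r1, r2, r3, r4, r5, r6, r7, r8, r9, r10) →
    r1.length = s1.length + channels.countP (fun c => decide (c ≤ 9)) ∧
    r2.length = s2.length + channels.countP (fun c => decide (¬(c ≤ 9) ∧ c ≤ 18)) ∧
    r3.length = s3.length + channels.countP (fun c => decide (¬(c ≤ 18) ∧ c ≤ 27)) ∧
    r4.length = s4.length + channels.countP (fun c => decide (¬(c ≤ 27) ∧ c ≤ 36)) ∧
    r5.length = s5.length + channels.countP (fun c => decide (¬(c ≤ 36) ∧ c ≤ 45)) ∧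
    r6.length = s6.length + channels.countP (fun c => decide (¬(c ≤ 45) ∧ c ≤ 54)) ∧
    r7.length = s7.length + channels.countP (fun c => decide (¬(c ≤ 54) ∧ c ≤ 63)) ∧
    r8.length = s8.length + channels.countP (fun c => decide (¬(c ≤ 63) ∧ c ≤ 72)) ∧
    r9.length = s9.length + channels.countP (fun c => decide (¬(c ≤ 72) ∧ c ≤ 81)) ∧
    r10.length = s10.length + channels.countP (fun c => decide (¬(c ≤ 81) ∧ c ≤ 90)) := by
  induction channels with
  | nil =>
    intro s1 s2 s3 s4 s5 s6 s7 s8 s9 s10 r1 r2 r3 r4 r5 r6 r7 r8 r9 r10 h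
    simp only [List.foldl_nil, Prod.mk.injEq] at h
    obtain ⟨e1, e2, e3, e4, e5, e6, e7, e8, e9, e10⟩ := h
    subst e1 e2 e3 e4 e5 e6 e7 e8 e9 e10
    simp
  | cons c cs ih =>
    intro s1 s2 s3 s4 s5 s6 s7 s8 s9 s10 r1 r2 r3 r4 r5 r6 r7 r8 r9 r10 h
    rw [List.foldl_cons] at h
    by_cases h1 : c ≤ 9
    · simp only [pvStepA, if_pos h1] at h
      have H := ih _ _ _ _ _ _ _ _ _ _ _ _ _ _ _ _ _ _ _ _ h
      simp only [List.length_append, List.length_cons, List.length_nil] at H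
      simp only [List.countP_cons, h1]
      norm_num at H ⊢
      first | (split_ifs <;> omega) | omega
    by_cases h2 : c ≤ 18
    · simp only [pvStepA, if_neg h1, if_pos h2] at h
      have H := ih _ _ _ _ _ _ _ _ _ _ _ _ _ _ _ _ _ _ _ _ h
      simp only [List.length_append, List.length_cons, List.length_nil] at H
      simp only [List.countP_cons, h1, h2]
      norm_num at H ⊢
      first | (split_ifs <;> omega) | omega
    by_cases h3 : c ≤ 27
    · simp only [pvStepA, if_neg h1, if_neg h2, if_pos h3] at h
      have H := ih _ _ _ _ _ _ _ _ _ _ _ _ _ _ _ _ _ _ _ _ h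
      simp only [List.length_append, List.length_cons, List.length_nil] at H
      simp only [List.countP_cons, h1, h2, h3]
      norm_num at H ⊢
      first | (split_ifs <;> omega) | omega
    by_cases h4 : c ≤ 36
    · simp only [pvStepA, if_neg h1, if_neg h2, if_neg h3, if_pos h4] at h
      have H := ih _ _ _ _ _ _ _ _ _ _ _ _ _ _ _ _ _ _ _ _ h
      simp only [List.length_append, List.length_cons, List.length_nil] at H
      simp only [List.countP_cons, h1, h2, h3, h4]
      norm_num at H ⊢
      first | (split_ifs <;> omega) | omega
    by_cases h5 : c ≤ 45
    · simp only [pvStepA, if_neg h1, if_neg h2, if_neg h3, if_neg h4, if_pos h5] at h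
      have H := ih _ _ _ _ _ _ _ _ _ _ _ _ _ _ _ _ _ _ _ _ h
      simp only [List.length_append, List.length_cons, List.length_nil] at H
      simp only [List.countP_cons, h1, h2, h3, h4, h5]
      norm_num at H ⊢
      first | (split_ifs <;> omega) | omega
    by_cases h6 : c ≤ 54
    · simp only [pvStepA, if_neg h1, if_neg h2, if_neg h3, if_neg h4, if_neg h5, if_pos h6] at h
      have H := ih _ _ _ _ _ _ _ _ _ _ _ _ _ _ _ _ _ _ _ _ h
      simp only [List.length_append, List.length_cons, List.length_nil] at H
      simp only [List.countP_cons, h1, h2, h3, h4, h5, h6]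
      norm_num at H ⊢
      first | (split_ifs <;> omega) | omega
    by_cases h7 : c ≤ 63
    · simp only [pvStepA, if_neg h1, if_neg h2, if_neg h3, if_neg h4, if_neg h5, if_neg h6, if_pos h7] at h
      have H := ih _ _ _ _ _ _ _ _ _ _ _ _ _ _ _ _ _ _ _ _ h
      simp only [List.length_append, List.length_cons, List.length_nil] at H
      simp only [List.countP_cons, h1, h2, h3, h4, h5, h6, h7]
      norm_num at H ⊢
      first | (split_ifs <;> omega) | omega
    by_cases h8 : c ≤ 72
    · simp only [pvStepA, if_neg h1, if_neg h2, if_neg h3, if_neg h4, if_neg h5, if_neg h6, if_neg h7, if_pos h8] at h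
      have H := ih _ _ _ _ _ _ _ _ _ _ _ _ _ _ _ _ _ _ _ _ h
      simp only [List.length_append, List.length_cons, List.length_nil] at H
      simp only [List.countP_cons, h1, h2, h3, h4, h5, h6, h7, h8]
      norm_num at H ⊢
      first | (split_ifs <;> omega) | omega
    by_cases h9 : c ≤ 81
    · simp only [pvStepA, if_neg h1, if_neg h2, if_neg h3, if_neg h4, if_neg h5, if_neg h6, if_neg h7, if_neg h8, if_pos h9] at h
      have H := ih _ _ _ _ _ _ _ _ _ _ _ _ _ _ _ _ _ _ _ _ h
      simp only [List.length_append, List.length_cons, List.length_nil] at H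
      simp only [List.countP_cons, h1, h2, h3, h4, h5, h6, h7, h8, h9]
      norm_num at H ⊢
      first | (split_ifs <;> omega) | omega
    by_cases h10 : c ≤ 90
    · simp only [pvStepA, if_neg h1, if_neg h2, if_neg h3, if_neg h4, if_neg h5, if_neg h6, if_neg h7, if_neg h8, if_neg h9, if_pos h10] at h
      have H := ih _ _ _ _ _ _ _ _ _ _ _ _ _ _ _ _ _ _ _ _ h
      simp only [List.length_append, List.length_cons, List.length_nil] at H
      simp only [List.countP_cons, h1, h2, h3, h4, h5, h6, h7, h8, h9, h10]
      norm_num at H ⊢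
      first | (split_ifs <;> omega) | omega
    simp only [pvStepA, if_neg h1, if_neg h2, if_neg h3, if_neg h4, if_neg h5, if_neg h6, if_neg h7, if_neg h8, if_neg h9, if_neg h10] at h
    have H := ih _ _ _ _ _ _ _ _ _ _ _ _ _ _ _ _ _ _ _ _ h
    simp only [List.countP_cons, h1, h2, h3, h4, h5, h6, h7, h8, h9, h10]
    norm_num at H ⊢
    first | (split_ifs <;> omega) | omega


-- the items list of A's literal ten-key dict
set_option maxHeartbeats 1000000 in
lemma pvItemsA (v1 v2 v3 v4 v5 v6 v7 v8 v9 v10 : Int) :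
    (((((((((((PySem.Dict.empty :
        PySem.Dict Int Int).insert 1 v1).insert 2 v2).insert 3 v3).insert 4 v4).insert 5 v5).insert 6
        v6).insert 7 v7).insert 8 v8).insert 9 v9).insert 10 v10).items
      = [(1, v1), (2, v2), (3, v3), (4, v4), (5, v5), (6, v6), (7, v7), (8, v8), (9, v9), (10, v10)] := by
  rfl

-- the items list produced by B's difference loop over a ten-element cum list
set_option maxHeartbeats 1000000 in
lemma pvItemsB (c1 c2 c3 c4 c5 c6 c7 c8 c9 c10 : Int) :
    (List.foldl (fun (st : PySem.Dict Int Int × Int × Int) c =>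
        (st.1.insert st.2.1 (c - st.2.2), st.2.1 + 1, c))
      (PySem.Dict.empty, 1, 0) [c1,c2,c3,c4,c5,c6,c7,c8,c9,c10]).1.items
      = [(1, c1 - 0), (2, c2 - c1), (3, c3 - c2), (4, c4 - c3), (5, c5 - c4), (6, c6 - c5),
         (7, c7 - c6), (8, c8 - c7), (9, c9 - c8), (10, c10 - c9)] := by
  rfl

-- ===== VERDICT (by name: the statement is the Claim_ definition above) =====
set_option maxHeartbeats 1000000 in
theorem check_bins_spec : Claim_equal_check_bins := by
  intro channels _
  show check_bins channels = check_bins_alt channels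
  unfold check_bins check_bins_alt
  rw [show PySem.List.pyRange 1 11 1 = [1,2,3,4,5,6,7,8,9,10] from by decide]
  cases hr : channels.foldl pvStepA ([], [], [], [], [], [], [], [], [], []) with
  | mk b1 rest =>
  obtain ⟨b2, b3, b4, b5, b6, b7, b8, b9, b10⟩ := rest
  have H := pvFoldA_lens channels [] [] [] [] [] [] [] [] [] [] b1 b2 b3 b4 b5 b6 b7 b8 b9 b10 hr
  simp only [List.length_nil, Nat.zero_add] at H
  obtain ⟨h1, h2, h3, h4, h5, h6, h7, h8, h9, h10⟩ := H
  simp only [List.map_cons, List.map_nil]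
  rw [pvItemsA, pvItemsB]
  simp only [show (9:Int)*1 = 9 from by norm_num, show (9:Int)*2 = 18 from by norm_num, show (9:Int)*3 = 27 from by norm_num, show (9:Int)*4 = 36 from by norm_num, show (9:Int)*5 = 45 from by norm_num, show (9:Int)*6 = 54 from by norm_num, show (9:Int)*7 = 63 from by norm_num, show (9:Int)*8 = 72 from by norm_num, show (9:Int)*9 = 81 from by norm_num, show (9:Int)*10 = 90 from by norm_num]
  simp only [List.cons.injEq, Prod.mk.injEq, and_true, true_and]
  refine ⟨?_, ?_, ?_, ?_, ?_, ?_, ?_, ?_, ?_, ?_⟩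
  · rw [pvCountLe_eq_countP]
    omega
  · rw [pvCountLe_eq_countP, pvCountLe_eq_countP]
    have I := pvCountP_interval 9 18 (by norm_num) channels
    omega
  · rw [pvCountLe_eq_countP, pvCountLe_eq_countP]
    have I := pvCountP_interval 18 27 (by norm_num) channels
    omega
  · rw [pvCountLe_eq_countP, pvCountLe_eq_countP]
    have I := pvCountP_interval 27 36 (by norm_num) channels
    omega
  · rw [pvCountLe_eq_countP, pvCountLe_eq_countP]
    have I := pvCountP_interval 36 45 (by norm_num) channels
    omega
  · rw [pvCountLe_eq_countP, pvCountLe_eq_countP]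
    have I := pvCountP_interval 45 54 (by norm_num) channels
    omega
  · rw [pvCountLe_eq_countP, pvCountLe_eq_countP]
    have I := pvCountP_interval 54 63 (by norm_num) channels
    omega
  · rw [pvCountLe_eq_countP, pvCountLe_eq_countP]
    have I := pvCountP_interval 63 72 (by norm_num) channels
    omega
  · rw [pvCountLe_eq_countP, pvCountLe_eq_countP]
    have I := pvCountP_interval 72 81 (by norm_num) channels
    omega
  · rw [pvCountLe_eq_countP, pvCountLe_eq_countP]
    have I := pvCountP_interval 81 90 (by norm_num) channels
    omega
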